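-- pv_equiv track=rewrite | github.com/amaraljt/LaTeXPy | LaTeXPy.py | relcomposition
-- ===== SOURCE A (Python) =====
-- def relcomposition(R,S):
--   ss = {}
--   for x in S:
--     if len(x)==2:
--       if x[0] not in ss.keys(): ss[x[0]] = set()
--       ss[x[0]].add(x[1])
--   rr = frozenset(x for x in R if len(x)==2 and x[1] in ss.keys())
--   return frozenset((x[0],y) for x in rr for y in ss[x[1]])
-- ===== SOURCE B (Python) =====
-- def relcomposition(R, S):
--   return frozenset((x[0], y[1]) for x in R for y in S
--                    if len(x) == 2 and len(y) == 2 and x[1] == y[0])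
-- ===== Notes on version B (the rewrite author's own statement) =====
-- stated objective: simpler
-- what changed: Replaced A's build-a-dict-of-successor-sets-then-join strategy by a direct double scan over R and S that emits (x[0],y[1]) whenever x[1]==y[0], collapsed by one frozenset.
import Mathlib
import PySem

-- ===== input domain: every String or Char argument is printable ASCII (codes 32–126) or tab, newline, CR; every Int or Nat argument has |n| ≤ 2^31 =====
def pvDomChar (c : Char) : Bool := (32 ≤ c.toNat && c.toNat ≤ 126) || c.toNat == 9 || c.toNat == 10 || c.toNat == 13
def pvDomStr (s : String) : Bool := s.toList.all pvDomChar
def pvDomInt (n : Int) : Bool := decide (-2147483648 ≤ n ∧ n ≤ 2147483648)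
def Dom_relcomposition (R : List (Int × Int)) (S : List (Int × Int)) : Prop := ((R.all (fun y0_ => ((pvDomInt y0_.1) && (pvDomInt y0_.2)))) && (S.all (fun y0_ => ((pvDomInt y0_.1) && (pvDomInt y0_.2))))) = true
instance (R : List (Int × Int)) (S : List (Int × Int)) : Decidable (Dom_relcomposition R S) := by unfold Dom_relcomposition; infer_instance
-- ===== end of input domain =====

-- B replaces A's dict-of-successor-sets join by a direct double scan over R and S; objective: simpler.

-- ===== PORT A =====
-- A builds ss : dict mapping each first component of S to the set of its second
-- components (the `if x[0] not in ss: ss[x[0]] = set(); ss[x[0]].add(x[1])` pattern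
-- is Dict.modify with default empty set), filters R into the frozenset rr, then
-- joins.  Pairs (Int × Int) always have len == 2, so the len guards are vacuous.
def relcomposition (R : List (Int × Int)) (S : List (Int × Int)) : List (Int × Int) :=
  let ss : PySem.Dict Int (PySem.Set Int) :=
    S.foldl (fun d x => d.modify x.1 PySem.Set.empty (fun t => t.add x.2)) PySem.Dict.empty
  let rr : PySem.Set (Int × Int) :=
    PySem.Set.ofList (R.filter (fun x => ss.contains x.2))
  PySem.Set.ofList (rr.flatMap (fun x => (ss.getD x.2 PySem.Set.empty).map (fun y => (x.1, y))))

-- ===== PORT B =====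
-- the genexpr 'for x in R for y in S if x[1]==y[0]' is flatMap/filter/map; len guards vacuous on pairs
def relcomposition_alt (R : List (Int × Int)) (S : List (Int × Int)) : List (Int × Int) :=
  PySem.Set.ofList (R.flatMap (fun x => (S.filter (fun y => x.2 == y.1)).map (fun y => (x.1, y.2))))

-- ===== PRECONDITION & SPEC =====
def Spec_relcomposition (R : List (Int × Int)) (S : List (Int × Int)) (out : List (Int × Int)) : Prop := out = relcomposition_alt R S
instance (R : List (Int × Int)) (S : List (Int × Int)) (out : List (Int × Int)) : Decidable (Spec_relcomposition R S out) := by unfold Spec_relcomposition; infer_instance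

-- ===== CLAIM (what is proved, stated in full; the proofs are below) =====
def Claim_equal_relcomposition : Prop := ∀ (R : List (Int × Int)) (S : List (Int × Int)), Dom_relcomposition R S → Spec_relcomposition R S (relcomposition R S)

-- ===== LEMMAS AND PROOFS =====

-- fold that processes a list of "blocks": the shape shared by both sides after
-- flattening the set comprehensions
def pvF {X P : Type} [BEq P] (blk : X → List P) (l : List X) (s : PySem.Set P) : PySem.Set P :=
  l.foldl (fun s x => s.update (blk x)) s

theorem pvF_cons {X P : Type} [BEq P] (blk : X → List P) (x : X) (l : List X) (s : PySem.Set P) :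
    pvF blk (x :: l) s = pvF blk l (s.update (blk x)) := rfl

theorem pv_update_absorb {P : Type} [BEq P] [LawfulBEq P] :
    ∀ (l : List P) (s : PySem.Set P), (∀ a ∈ l, a ∈ s) → s.update l = s := by
  intro l
  induction l with
  | nil => intro s _; rfl
  | cons a l ih =>
      intro s h
      rw [PySem.Set.update_cons, PySem.Set.add_of_mem (h a (by simp))]
      exact ih s (fun b hb => h b (by simp [hb]))

theorem pv_mem_update_right {P : Type} [BEq P] [LawfulBEq P] (s : PySem.Set P) (l : List P)
    (a : P) (h : a ∈ s) : a ∈ s.update l := (PySem.Set.mem_update s l a).2 (Or.inl h)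

theorem pvF_mono {X P : Type} [BEq P] [LawfulBEq P] (blk : X → List P) :
    ∀ (l : List X) (s : PySem.Set P) (a : P), a ∈ s → a ∈ pvF blk l s := by
  intro l
  induction l with
  | nil => intro s a h; exact h
  | cons x l ih =>
      intro s a h
      rw [pvF_cons]
      exact ih _ a (pv_mem_update_right s (blk x) a h)

theorem pvF_mem_blk {X P : Type} [BEq P] [LawfulBEq P] (blk : X → List P) :
    ∀ (t : List X) (s : PySem.Set P) (x : X), x ∈ t → ∀ a ∈ blk x, a ∈ pvF blk t s := by
  intro t
  induction t with
  | nil => intro s x hx; simp at hx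
  | cons y t ih =>
      intro s x hx a ha
      rw [pvF_cons]
      rcases List.mem_cons.mp hx with h | h
      · subst h
        exact pvF_mono blk t _ a
          ((PySem.Set.mem_update s (blk x) a).2 (Or.inr ha))
      · exact ih _ x h a ha

theorem pvF_foldl_add {X P : Type} [BEq X] [LawfulBEq X] [BEq P] [LawfulBEq P]
    (blk : X → List P) :
    ∀ (m : List X) (t : PySem.Set X) (s : PySem.Set P),
      pvF blk (List.foldl PySem.Set.add t m) s = pvF blk m (pvF blk t s) := by
  intro m
  induction m with
  | nil => intro t s; rfl
  | cons x m ih =>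
      intro t s
      simp only [List.foldl_cons]
      rw [ih (t.add x) s, pvF_cons]
      by_cases hx : x ∈ t
      · rw [PySem.Set.add_of_mem hx,
          pv_update_absorb (blk x) (pvF blk t s) (pvF_mem_blk blk t s x hx)]
      · rw [PySem.Set.add_of_not_mem hx]
        show pvF blk m (pvF blk (t ++ [x]) s) = _
        congr 1
        show List.foldl _ s (t ++ [x]) = _
        rw [List.foldl_append]
        rfl

theorem pvF_ofList {X P : Type} [BEq X] [LawfulBEq X] [BEq P] [LawfulBEq P]
    (blk : X → List P) (m : List X) (s : PySem.Set P) :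
    pvF blk (PySem.Set.ofList m) s = pvF blk m s := by
  rw [PySem.Set.ofList_eq_foldl, pvF_foldl_add blk m [] s]
  rfl

theorem pv_update_flatMap {X P : Type} [BEq P] (f : X → List P) :
    ∀ (l : List X) (s : PySem.Set P), s.update (l.flatMap f) = pvF f l s := by
  intro l
  induction l with
  | nil => intro s; rfl
  | cons x l ih =>
      intro s
      rw [List.flatMap_cons, PySem.Set.update_append, pvF_cons, ih]

theorem pv_update_map_ofList {X P : Type} [BEq X] [LawfulBEq X] [BEq P] [LawfulBEq P]
    (h : X → P) (m : List X) (s : PySem.Set P) :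
    s.update (List.map h (PySem.Set.ofList m)) = s.update (List.map h m) := by
  have key : ∀ (l : List X) (s : PySem.Set P),
      s.update (List.map h l) = pvF (fun x => [h x]) l s := by
    intro l
    induction l with
    | nil => intro s; rfl
    | cons x l ih =>
        intro s
        rw [List.map_cons, PySem.Set.update_cons, pvF_cons, ih]
        rfl
  rw [key, key, pvF_ofList]

theorem pvF_congr {X P : Type} [BEq P] (f g : X → List P)
    (h : ∀ (s : PySem.Set P) (x : X), s.update (f x) = s.update (g x)) :
    ∀ (l : List X) (s : PySem.Set P), pvF f l s = pvF g l s := by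
  intro l
  induction l with
  | nil => intro s; rfl
  | cons x l ih =>
      intro s
      rw [pvF_cons, pvF_cons, h s x, ih]

theorem pvF_filter {X P : Type} [BEq P] (blk : X → List P) (p : X → Bool)
    (h : ∀ x, p x = false → blk x = []) :
    ∀ (l : List X) (s : PySem.Set P), pvF blk (l.filter p) s = pvF blk l s := by
  intro l
  induction l with
  | nil => intro s; rfl
  | cons x l ih =>
      intro s
      by_cases hp : p x = true
      · rw [List.filter_cons_of_pos hp, pvF_cons, pvF_cons, ih]
      · rw [List.filter_cons_of_neg hp, pvF_cons,
          h x (Bool.eq_false_iff.mpr hp), ih]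
        rfl

-- the dict built by A's first loop: value at k is the set of second components of
-- pairs of S whose first component is k, in order of first appearance
theorem pv_ssGetD :
    ∀ (S : List (Int × Int)) (d : PySem.Dict Int (PySem.Set Int)) (k : Int),
      (S.foldl (fun d x => d.modify x.1 PySem.Set.empty (fun t => t.add x.2)) d).getD k PySem.Set.empty
        = (d.getD k PySem.Set.empty).update ((S.filter (fun y => k == y.1)).map Prod.snd) := by
  intro S
  induction S with
  | nil => intro d k; rfl
  | cons y S ih =>
      intro d k
      simp only [List.foldl_cons]
      rw [ih]
      by_cases hk : k = y.1
      · rw [hk, PySem.Dict.getD_modify_self]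
        have hf : (List.filter (fun z => y.1 == z.1) (y :: S)) = y :: List.filter (fun z => y.1 == z.1) S := by
          simp
        rw [hf, List.map_cons, PySem.Set.update_cons]
      · rw [PySem.Dict.getD_modify_of_ne _ _ _ hk]
        have hf : (List.filter (fun z => k == z.1) (y :: S)) = List.filter (fun z => k == z.1) S := by
          simp [hk]
        rw [hf]

theorem pv_ssContains :
    ∀ (S : List (Int × Int)) (d : PySem.Dict Int (PySem.Set Int)) (k : Int),
      (S.foldl (fun d x => d.modify x.1 PySem.Set.empty (fun t => t.add x.2)) d).contains k
        = (d.contains k || decide (k ∈ S.map Prod.fst)) := by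
  intro S
  induction S with
  | nil => intro d k; simp
  | cons y S ih =>
      intro d k
      simp only [List.foldl_cons]
      rw [ih]
      rw [PySem.Dict.contains_modify]
      by_cases hk : k = y.1
      · simp [hk, List.mem_cons]
      · have h1 : (k == y.1) = false := by simp [hk]
        have h2 : (k ∈ y.1 :: List.map Prod.fst S) ↔ (k ∈ List.map Prod.fst S) := by
          simp [List.mem_cons, hk]
        rw [h1, Bool.false_or, List.map_cons, decide_eq_decide.mpr h2]

-- the dict A's first loop builds (proof-only abbreviation)
def pvSS (S : List (Int × Int)) : PySem.Dict Int (PySem.Set Int) :=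
  S.foldl (fun d x => d.modify x.1 PySem.Set.empty (fun t => t.add x.2)) PySem.Dict.empty

theorem pv_ssGetD' (S : List (Int × Int)) (k : Int) :
    (pvSS S).getD k PySem.Set.empty
      = PySem.Set.ofList ((S.filter (fun y => k == y.1)).map Prod.snd) := by
  unfold pvSS
  rw [pv_ssGetD S PySem.Dict.empty k, PySem.Dict.getD_empty]
  exact PySem.Set.update_nil_left _

theorem pv_ssContains' (S : List (Int × Int)) (k : Int) :
    (pvSS S).contains k = decide (k ∈ S.map Prod.fst) := by
  unfold pvSS
  rw [pv_ssContains S PySem.Dict.empty k, PySem.Dict.contains_empty, Bool.false_or]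

theorem relcomposition_eq_alt (R S : List (Int × Int)) :
    relcomposition R S = relcomposition_alt R S := by
  have hblocks : ∀ (s : PySem.Set (Int × Int)) (x : Int × Int),
      s.update (((pvSS S).getD x.2 PySem.Set.empty).map (fun y => (x.1, y)))
        = s.update ((S.filter (fun y => x.2 == y.1)).map (fun y => (x.1, y.2))) := by
    intro s x
    rw [pv_ssGetD' S x.2, pv_update_map_ofList, List.map_map]
    rfl
  have hempty : ∀ x : Int × Int, (pvSS S).contains x.2 = false →
      ((S.filter (fun y => x.2 == y.1)).map (fun y : Int × Int => (x.1, y.2))) = ([] : List (Int × Int)) := by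
    intro x hx
    rw [pv_ssContains' S x.2] at hx
    simp only [decide_eq_false_iff_not, List.mem_map] at hx
    have hfe : S.filter (fun y => x.2 == y.1) = [] := by
      rw [List.filter_eq_nil_iff]
      intro y hy
      simp only [beq_iff_eq]
      intro hxy
      exact hx ⟨y, hy, hxy.symm⟩
    rw [hfe, List.map_nil]
  show PySem.Set.ofList
      ((PySem.Set.ofList (R.filter (fun x => (pvSS S).contains x.2))).flatMap
        (fun x => ((pvSS S).getD x.2 PySem.Set.empty).map (fun y => (x.1, y))))
    = PySem.Set.ofList (R.flatMap (fun x => (S.filter (fun y => x.2 == y.1)).map (fun y => (x.1, y.2))))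
  calc
    PySem.Set.ofList
        ((PySem.Set.ofList (R.filter (fun x => (pvSS S).contains x.2))).flatMap
          (fun x => ((pvSS S).getD x.2 PySem.Set.empty).map (fun y => (x.1, y))))
        = PySem.Set.update []
            ((PySem.Set.ofList (R.filter (fun x => (pvSS S).contains x.2))).flatMap
              (fun x => ((pvSS S).getD x.2 PySem.Set.empty).map (fun y => (x.1, y)))) := by
          rw [PySem.Set.update_nil_left]
    _ = pvF (fun x => ((pvSS S).getD x.2 PySem.Set.empty).map (fun y => (x.1, y)))
          (PySem.Set.ofList (R.filter (fun x => (pvSS S).contains x.2))) [] := by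
          rw [pv_update_flatMap]
    _ = pvF (fun x => ((pvSS S).getD x.2 PySem.Set.empty).map (fun y => (x.1, y)))
          (R.filter (fun x => (pvSS S).contains x.2)) [] := pvF_ofList _ _ []
    _ = pvF (fun x => (S.filter (fun y => x.2 == y.1)).map (fun y => (x.1, y.2)))
          (R.filter (fun x => (pvSS S).contains x.2)) [] := pvF_congr _ _ hblocks _ []
    _ = pvF (fun x => (S.filter (fun y => x.2 == y.1)).map (fun y => (x.1, y.2))) R [] := by
          refine pvF_filter _ _ ?_ R []
          intro x hx
          exact hempty x (by simpa using hx)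
    _ = PySem.Set.update []
          (R.flatMap (fun x => (S.filter (fun y => x.2 == y.1)).map (fun y => (x.1, y.2)))) :=
          (pv_update_flatMap _ R []).symm
    _ = PySem.Set.ofList
          (R.flatMap (fun x => (S.filter (fun y => x.2 == y.1)).map (fun y => (x.1, y.2)))) :=
          PySem.Set.update_nil_left _

-- ===== VERDICT (by name: the statement is the Claim_ definition above) =====
theorem relcomposition_spec : Claim_equal_relcomposition := by
  intro R S _
  unfold Spec_relcomposition
  exact relcomposition_eq_alt R S
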